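-- pv_equiv track=rewrite | github.com/elspanishgeek/distributed-systems-kit | apps/map_reduce/map_reduce.py | _reducing_task
-- ===== SOURCE A (Python) =====
-- def _reducing_task(mapped_output):
--     output = {}
--     for key in mapped_output:
--         data = {
--             'timestamps': {},
--             'paths': {},
--             'codes': {},
--             'uids': {},
--         }
--         for entry in mapped_output[key]:
--
--             timestamp = entry.get('timestamp')
--             if timestamp is not None:
--                 data['timestamps'][timestamp] = data['timestamps'].setdefault(timestamp, 0) + 1
--
--             path = entry.get('path')
--             if path is not None:
--                 data['paths'][path] = data['paths'].setdefault(path, 0) + 1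
--
--             code = entry.get('code')
--             if code is not None:
--                 data['codes'][code] = data['codes'].setdefault(code, 0) + 1
--
--             uid = entry.get('uid')
--             if uid is not None:
--                 data['uids'][uid] = data['uids'].setdefault(uid, 0) + 1
--
--         output[key] = data
--
--     return output
-- ===== SOURCE B (Python) =====
-- def _reducing_task(mapped_output):
--     def field_counts(entries, field):
--         vals = [e.get(field) for e in entries]
--         vals = [v for v in vals if v is not None]
--         return {v: vals.count(v) for v in dict.fromkeys(vals)}
--
--     return {
--         key: {
--             'timestamps': field_counts(entries, 'timestamp'),
--             'paths': field_counts(entries, 'path'),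
--             'codes': field_counts(entries, 'code'),
--             'uids': field_counts(entries, 'uid'),
--         }
--         for key, entries in mapped_output.items()
--     }
-- ===== Notes on version B (the rewrite author's own statement) =====
-- stated objective: alternative
-- what changed: Replaces A's single pass per key maintaining four mutable count-dict accumulators with four independent per-field passes, each collecting the field's values and building its count-dict by dedup-then-count (dict.fromkeys + list.count) instead of incremental setdefault updates.
import Mathlib
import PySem

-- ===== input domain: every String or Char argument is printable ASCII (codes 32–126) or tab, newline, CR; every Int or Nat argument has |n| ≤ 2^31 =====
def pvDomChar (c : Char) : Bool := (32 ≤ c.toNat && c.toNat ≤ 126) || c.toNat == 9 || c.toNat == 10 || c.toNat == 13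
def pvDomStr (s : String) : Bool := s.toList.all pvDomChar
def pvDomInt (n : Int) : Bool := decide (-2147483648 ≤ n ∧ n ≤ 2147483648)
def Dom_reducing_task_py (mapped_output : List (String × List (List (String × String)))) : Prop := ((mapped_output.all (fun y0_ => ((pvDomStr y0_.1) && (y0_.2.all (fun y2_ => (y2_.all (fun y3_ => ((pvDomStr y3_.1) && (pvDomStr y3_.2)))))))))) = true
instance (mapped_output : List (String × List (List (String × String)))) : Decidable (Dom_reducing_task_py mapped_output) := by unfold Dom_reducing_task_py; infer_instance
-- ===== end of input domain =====

-- B: four independent per-field passes (dedup-then-count) instead of A's one pass with four accumulators; return-value equivalence.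

-- ===== PORT A =====
def pvAGet (entry : List (String × String)) (k : String) : Option String :=
  (PySem.Dict.mk entry).get? k

def pvAStep (data : PySem.Dict String Int × PySem.Dict String Int × PySem.Dict String Int × PySem.Dict String Int)
    (entry : List (String × String)) :
    PySem.Dict String Int × PySem.Dict String Int × PySem.Dict String Int × PySem.Dict String Int :=
  let dt := match pvAGet entry "timestamp" with
    | some v => ((data.1.setdefault v 0).insert v (data.1.getD v 0 + 1))
    | none => data.1
  let dp := match pvAGet entry "path" with
    | some v => ((data.2.1.setdefault v 0).insert v (data.2.1.getD v 0 + 1))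
    | none => data.2.1
  let dc := match pvAGet entry "code" with
    | some v => ((data.2.2.1.setdefault v 0).insert v (data.2.2.1.getD v 0 + 1))
    | none => data.2.2.1
  let du := match pvAGet entry "uid" with
    | some v => ((data.2.2.2.setdefault v 0).insert v (data.2.2.2.getD v 0 + 1))
    | none => data.2.2.2
  (dt, dp, dc, du)

def reducing_task_py (mapped_output : List (String × List (List (String × String)))) :
    List (String × List (String × List (String × Int))) :=
  (mapped_output.foldl
    (fun (output : PySem.Dict String (List (String × List (String × Int)))) kv =>
      let entries := ((PySem.Dict.mk mapped_output).get? kv.1).getD []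
      let data := entries.foldl pvAStep (PySem.Dict.empty, PySem.Dict.empty, PySem.Dict.empty, PySem.Dict.empty)
      output.insert kv.1
        [("timestamps", data.1.items), ("paths", data.2.1.items),
         ("codes", data.2.2.1.items), ("uids", data.2.2.2.items)])
    PySem.Dict.empty).items

-- ===== PORT B =====
def pvFieldCounts (entries : List (List (String × String))) (field : String) : List (String × Int) :=
  let vals0 := entries.map (fun e => (PySem.Dict.mk e).get? field)
  let vals := vals0.filterMap id
  (PySem.Set.ofList vals).map (fun v => (v, (vals.count v : Int)))

def reducing_task_py_alt (mapped_output : List (String × List (List (String × String)))) :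
    List (String × List (String × List (String × Int))) :=
  (mapped_output.foldl
    (fun (output : PySem.Dict String (List (String × List (String × Int)))) kv =>
      output.insert kv.1
        [("timestamps", pvFieldCounts kv.2 "timestamp"), ("paths", pvFieldCounts kv.2 "path"),
         ("codes", pvFieldCounts kv.2 "code"), ("uids", pvFieldCounts kv.2 "uid")])
    PySem.Dict.empty).items

-- ===== PRECONDITION & SPEC =====
-- Pre_ excludes association lists with duplicate keys, which cannot arise from a Python dict
-- (A resolves mapped_output[key] by first match while B pairs each key with its own value).
def Pre_reducing_task_py (mapped_output : List (String × List (List (String × String)))) : Prop :=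
  (mapped_output.map Prod.fst).Nodup
instance (mapped_output : List (String × List (List (String × String)))) : Decidable (Pre_reducing_task_py mapped_output) := by unfold Pre_reducing_task_py; infer_instance

def pvWitness_reducing_task_py : (List (String × List (List (String × String)))) :=
  [("k", [[("timestamp", "1"), ("path", "/")], [("timestamp", "1"), ("uid", "u")]]), ("j", [])]

def Spec_reducing_task_py (mapped_output : List (String × List (List (String × String)))) (out : List (String × List (String × List (String × Int)))) : Prop := out = reducing_task_py_alt mapped_output
instance (mapped_output : List (String × List (List (String × String)))) (out : List (String × List (String × List (String × Int)))) : Decidable (Spec_reducing_task_py mapped_output out) := by unfold Spec_reducing_task_py; infer_instance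

-- ===== CLAIM (what is proved, stated in full; the proofs are below) =====
def Claim_equal_reducing_task_py : Prop := ∀ (mapped_output : List (String × List (List (String × String)))), Dom_reducing_task_py mapped_output → Pre_reducing_task_py mapped_output → Spec_reducing_task_py mapped_output (reducing_task_py mapped_output)

-- ===== LEMMAS AND PROOFS =====

-- setdefault-then-assign is a plain insert of getD+1
theorem pvStepEq (d : PySem.Dict String Int) (v : String) :
    (d.setdefault v 0).insert v (d.getD v 0 + 1) = d.insert v (d.getD v 0 + 1) := by
  by_cases h : d.contains v = true
  · rw [PySem.Dict.setdefault_of_contains d 0 h]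
  · rw [PySem.Dict.setdefault_of_not_contains d 0 (by simpa using h), PySem.Dict.insert_insert_self]

def pvGFold (entries : List (List (String × String))) (field : String) (d : PySem.Dict String Int) :
    PySem.Dict String Int :=
  (entries.filterMap (fun e => pvAGet e field)).foldl (fun d v => d.insert v (d.getD v 0 + 1)) d

-- A's combined loop is four independent field folds
theorem pvFoldA (entries : List (List (String × String)))
    (d1 d2 d3 d4 : PySem.Dict String Int) :
    entries.foldl pvAStep (d1, d2, d3, d4) =
      (pvGFold entries "timestamp" d1, pvGFold entries "path" d2,
       pvGFold entries "code" d3, pvGFold entries "uid" d4) := by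
  induction entries generalizing d1 d2 d3 d4 with
  | nil => simp [pvGFold]
  | cons e rest ih =>
    cases h1 : pvAGet e "timestamp" <;> cases h2 : pvAGet e "path" <;>
      cases h3 : pvAGet e "code" <;> cases h4 : pvAGet e "uid" <;>
      simp [List.foldl_cons, pvAStep, h1, h2, h3, h4, pvStepEq, ih, pvGFold]

theorem pvGFoldItems (entries : List (List (String × String))) (field : String) :
    (pvGFold entries field PySem.Dict.empty).items = pvFieldCounts entries field := by
  unfold pvGFold pvFieldCounts
  rw [PySem.Dict.foldl_insert_getD_add_one_eq_counter, PySem.Dict.items_counter]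
  simp [pvAGet, List.filterMap_map, Function.comp]

theorem pvLookup (mapped_output : List (String × List (List (String × String))))
    (h : (mapped_output.map Prod.fst).Nodup)
    (kv : String × List (List (String × String))) (hm : kv ∈ mapped_output) :
    (PySem.Dict.mk mapped_output).get? kv.1 = some kv.2 := by
  apply PySem.Dict.get?_of_mem_items (v := kv.2)
  · simpa [PySem.Dict.items] using hm
  · simpa [PySem.Dict.keys, PySem.Dict.items] using h

-- ===== VERDICT (by name: the statement is the Claim_ definition above) =====
theorem reducing_task_py_spec : Claim_equal_reducing_task_py := by
  intro mo _ hpre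
  unfold Spec_reducing_task_py reducing_task_py reducing_task_py_alt
  congr 1
  apply PySem.List.foldl_congr_mem
  intro acc kv hm
  rw [pvLookup mo hpre kv hm]
  simp only [Option.getD_some, pvFoldA, pvGFoldItems]
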